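-- pv_equiv track=rewrite | github.com/Kudito98/Codesignal-tasks | code-arcade/159-pyraminxPuzzle/pyraminxPuzzle.py | solution
-- ===== SOURCE A (Python) =====
-- def rotate(move, faces):
--     face1, face2, face3 = faces
--     face1[0], face2[4], face3[8] = face2[4], face3[8], face1[0]
--     if move.islower():
--         face1[1], face2[6], face3[3] = face2[6], face3[3], face1[1]
--         face1[2], face2[5], face3[7] = face2[5], face3[7], face1[2]
--         face1[3], face2[1], face3[6] = face2[1], face3[6], face1[3]
--     return [face1, face2, face3]
--
-- def solution(faceColors, moves):
--     front, bottom, left, right = [[color for _ in range(9)] for color in faceColors]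
--     for move in moves[::-1]:
--         corner = move[0].upper()
--         if corner == "U":
--             faces = [front, left, right]
--         if corner == "R":
--             faces = [right, bottom, front]
--         if corner == "L":
--             faces = [left, front, bottom]
--         if corner == "B":
--             faces = [bottom, right, left]
--         faces = rotate(move[0], faces)
--         if len(move) == 1:
--             faces = rotate(move[0], faces)
--     return [front, bottom, left, right]
-- ===== SOURCE B (Python) =====
-- def solution(faceColors, moves):
--     F, BO, L, R = 0, 9, 18, 27
--     triples = {'U': (F, L, R), 'R': (R, BO, F), 'L': (L, F, BO), 'B': (BO, R, L)}
--     perm = list(range(36))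
--     for move in reversed(moves):
--         c = move[0]
--         a, b, d = triples[c.upper()]
--         cycles = [(a, b + 4, d + 8)]
--         if c.islower():
--             cycles += [(a + 1, b + 6, d + 3), (a + 2, b + 5, d + 7), (a + 3, b + 1, d + 6)]
--         q = list(range(36))
--         for x, y, z in cycles:
--             q[x], q[y], q[z] = y, z, x
--         if len(move) == 1:
--             q = [q[q[i]] for i in range(36)]
--         perm = [perm[q[i]] for i in range(36)]
--     return [[faceColors[perm[9 * f + j] // 9] for j in range(9)] for f in range(4)]
-- ===== Notes on version B (the rewrite author's own statement) =====
-- stated objective: alternative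
-- what changed: B replaces A's in-place triple-swap mutation of four face lists by a single 36-cell index permutation: each move's cell cycles are composed into one permutation of 0..35 and the final faces are read off the initial uniform state through it.
import Mathlib
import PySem

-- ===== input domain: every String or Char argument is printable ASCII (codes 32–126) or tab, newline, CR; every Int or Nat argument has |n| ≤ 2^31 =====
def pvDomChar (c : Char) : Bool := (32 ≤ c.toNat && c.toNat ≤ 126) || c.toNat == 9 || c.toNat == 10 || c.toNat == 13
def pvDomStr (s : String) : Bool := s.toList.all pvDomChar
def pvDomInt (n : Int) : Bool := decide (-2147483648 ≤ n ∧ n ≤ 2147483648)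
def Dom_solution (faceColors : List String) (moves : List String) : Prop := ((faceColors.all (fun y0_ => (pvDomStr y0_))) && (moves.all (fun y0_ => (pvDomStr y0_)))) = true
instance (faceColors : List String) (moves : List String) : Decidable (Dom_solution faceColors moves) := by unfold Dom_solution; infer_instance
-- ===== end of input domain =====

-- B replaces A's in-place triple-swap mutation of four face lists by composing each move's
-- cell cycles into one permutation of the 36 flat cell indices and reading the final faces
-- off the initial uniform state through it (objective: alternative; same asymptotic cost).
-- A mutates the lists it builds internally, never its arguments; equivalence is about the return value.

-- ===== PORT A =====
-- Python's simultaneous triple assignment f1[i1], f2[i2], f3[i3] = f2[i2], f3[i3], f1[i1]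
-- (RHS read first, then written; the three cells are distinct in every call made by rotate).
-- Indices are always in range on the calls solution makes (faces have 9 cells), so getD/set are exact there.
def pvSwap3 (f1 : List String) (i1 : Nat) (f2 : List String) (i2 : Nat) (f3 : List String) (i3 : Nat) :
    List String × List String × List String :=
  (f1.set i1 (f2.getD i2 ""), f2.set i2 (f3.getD i3 ""), f3.set i3 (f1.getD i1 ""))

-- rotate(move, faces); `move` is always the single character move[0] in A, so islower is char islower.
def pvRotate (move : Char) (faces : List (List String)) : List (List String) :=
  match faces with
  | [face1, face2, face3] =>
    let (face1, face2, face3) := pvSwap3 face1 0 face2 4 face3 8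
    let (face1, face2, face3) :=
      if PySem.Chars.islower move then
        let (face1, face2, face3) := pvSwap3 face1 1 face2 6 face3 3
        let (face1, face2, face3) := pvSwap3 face1 2 face2 5 face3 7
        pvSwap3 face1 3 face2 1 face3 6
      else (face1, face2, face3)
    [face1, face2, face3]
  | _ => faces  -- unreachable: rotate is only called with exactly three faces

-- the body of A's `for move in moves[::-1]` loop; state = (front, bottom, left, right)
def pvStepA (st : List String × List String × List String × List String) (move : String) :
    List String × List String × List String × List String :=
  match st with
  | (front, bottom, left, right) =>
    match PySem.Str.pyGet? move 0 with  -- move[0]; none = IndexError, excluded by Pre_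
    | none => st
    | some ch =>
      let corner := PySem.Chars.upperChar ch
      -- faces = rotate(move[0], faces); if len(move) == 1: faces = rotate(move[0], faces)
      let doRot : List (List String) → List (List String) := fun fs =>
        let fs := pvRotate ch fs
        if PySem.Str.len move == 1 then pvRotate ch fs else fs
      -- Python's if-chain: the four corners are distinct so at most one branch fires;
      -- under Pre_ exactly one does (an unmatched corner would reuse a stale `faces`: excluded by Pre_).
      if corner = 'U' then
        match doRot [front, left, right] with
        | [a, b, c] => (a, bottom, b, c)
        | _ => st
      else if corner = 'R' then
        match doRot [right, bottom, front] with
        | [a, b, c] => (c, b, left, a)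
        | _ => st
      else if corner = 'L' then
        match doRot [left, front, bottom] with
        | [a, b, c] => (b, c, a, right)
        | _ => st
      else if corner = 'B' then
        match doRot [bottom, right, left] with
        | [a, b, c] => (front, a, c, b)
        | _ => st
      else st

def solution (faceColors : List String) (moves : List String) : List (List String) :=
  match faceColors with
  | [c0, c1, c2, c3] =>
    let front := List.replicate 9 c0
    let bottom := List.replicate 9 c1
    let left := List.replicate 9 c2
    let right := List.replicate 9 c3
    -- moves[::-1] is moves.reverse (PySem.List.slice?_none_none_neg_one)
    match (moves.reverse).foldl pvStepA (front, bottom, left, right) with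
    | (f, b, l, r) => [f, b, l, r]
  | _ => []  -- unreachable: Python raises on unpacking unless len(faceColors) == 4 (excluded by Pre_)

-- ===== PORT B =====
-- triples: face offsets in the flat 36-cell state (front 0, bottom 9, left 18, right 27)
def pvTriples : PySem.Dict Char (Nat × Nat × Nat) :=
  PySem.Dict.ofList [('U', (0, 18, 27)), ('R', (27, 9, 0)), ('L', (18, 0, 9)), ('B', (9, 27, 18))]

-- the permutation q (as a 36-entry source-index table) performed by one move
def pvQFor (move : String) : List Nat :=
  match PySem.Str.pyGet? move 0 with  -- move[0]; none = IndexError, excluded by Pre_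
  | none => List.range 36
  | some c =>
    match pvTriples.get? (PySem.Chars.upperChar c) with  -- KeyError excluded by Pre_
    | none => List.range 36
    | some (a, b, d) =>
      let cycles := [(a, b + 4, d + 8)] ++
        (if PySem.Chars.islower c then
          [(a + 1, b + 6, d + 3), (a + 2, b + 5, d + 7), (a + 3, b + 1, d + 6)]
        else [])
      let q := cycles.foldl (fun q xyz =>
        match xyz with
        | (x, y, z) => ((q.set x y).set y z).set z x) (List.range 36)
      if PySem.Str.len move == 1 then (List.range 36).map (fun i => q.getD (q.getD i 0) 0) else q

def pvStepB (perm : List Nat) (move : String) : List Nat :=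
  let q := pvQFor move
  (List.range 36).map (fun i => perm.getD (q.getD i 0) 0)

def solution_alt (faceColors : List String) (moves : List String) : List (List String) :=
  let perm := (moves.reverse).foldl pvStepB (List.range 36)
  (List.range 4).map (fun f =>
    (List.range 9).map (fun j => faceColors.getD (perm.getD (9 * f + j) 0 / 9) ""))

-- ===== PRECONDITION & SPEC =====
-- Pre_ excludes: faceColors not of length 4 or a move that is the empty string (A raises there), and
-- moves whose first character is not a u/r/l/b letter — on those A either raises NameError or returns a
-- value produced by re-rotating a stale leftover `faces` triple, while B's dict lookup raises KeyError.
def Pre_solution (faceColors : List String) (moves : List String) : Prop :=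
  faceColors.length = 4 ∧
    (moves.all (fun m =>
      (PySem.Str.pyGet? m 0).any (fun c => ['u', 'U', 'r', 'R', 'l', 'L', 'b', 'B'].contains c))) = true
instance (faceColors : List String) (moves : List String) : Decidable (Pre_solution faceColors moves) := by
  unfold Pre_solution; infer_instance

def pvWitness_solution : List String × List String := (["g", "r", "y", "b"], ["U", "r'", "L", "b"])

def Spec_solution (faceColors : List String) (moves : List String) (out : List (List String)) : Prop := out = solution_alt faceColors moves
instance (faceColors : List String) (moves : List String) (out : List (List String)) : Decidable (Spec_solution faceColors moves out) := by unfold Spec_solution; infer_instance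

-- ===== CLAIM (what is proved, stated in full; the proofs are below) =====
def Claim_equal_solution : Prop := ∀ (faceColors : List String) (moves : List String), Dom_solution faceColors moves → Pre_solution faceColors moves → Spec_solution faceColors moves (solution faceColors moves)

-- ===== LEMMAS AND PROOFS =====

-- the A-state determined by a flat permutation p: face with offset off reads cells p[off+j]
def pvFace (fc : List String) (p : List Nat) (off : Nat) : List String :=
  (List.range 9).map (fun j => fc.getD (p.getD (off + j) 0 / 9) "")

def pvQuad (fc : List String) (p : List Nat) :
    List String × List String × List String × List String :=
  (pvFace fc p 0, pvFace fc p 9, pvFace fc p 18, pvFace fc p 27)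

lemma pvStep_comm (fc : List String) (p : List Nat) (move : String) (c : Char)
    (hc : PySem.Str.pyGet? move 0 = some c)
    (hm : c ∈ ['u', 'U', 'r', 'R', 'l', 'L', 'b', 'B']) :
    pvStepA (pvQuad fc p) move = pvQuad fc (pvStepB p move) := by
  cases hlen : (PySem.Str.len move == 1) <;>
    (fin_cases hm <;>
      simp only [pvStepA, pvStepB, pvQFor, pvQuad, pvFace, hc, hlen] <;> rfl)

lemma pvFold_comm (fc : List String) (ms : List String) (p : List Nat)
    (hv : ∀ m ∈ ms, ((PySem.Str.pyGet? m 0).any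
      (fun c => ['u', 'U', 'r', 'R', 'l', 'L', 'b', 'B'].contains c)) = true) :
    ms.foldl pvStepA (pvQuad fc p) = pvQuad fc (ms.foldl pvStepB p) := by
  induction ms generalizing p with
  | nil => rfl
  | cons m ms ih =>
    have hm := hv m (by simp)
    cases hget : PySem.Str.pyGet? m 0 with
    | none => rw [hget] at hm; simp [Option.any] at hm
    | some c =>
      rw [hget] at hm
      simp only [Option.any_some, List.contains_eq_mem, decide_eq_true_eq] at hm
      have hmem : c ∈ ['u', 'U', 'r', 'R', 'l', 'L', 'b', 'B'] := by
        simpa using hm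
      simp only [List.foldl_cons, pvStep_comm fc p m c hget hmem]
      exact ih _ (fun m hmm => hv m (by simp [hmm]))

-- ===== VERDICT (by name: the statement is the Claim_ definition above) =====
theorem solution_spec : Claim_equal_solution := by
  intro fc moves _ hpre
  obtain ⟨hlen, hall⟩ := hpre
  match fc, hlen with
  | [c0, c1, c2, c3], _ =>
    have hv : ∀ m ∈ moves.reverse, ((PySem.Str.pyGet? m 0).any
        (fun c => ['u', 'U', 'r', 'R', 'l', 'L', 'b', 'B'].contains c)) = true := by
      intro m hmm
      rw [List.mem_reverse] at hmm
      exact List.all_eq_true.mp hall m hmm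
    show solution [c0, c1, c2, c3] moves = solution_alt [c0, c1, c2, c3] moves
    have hinit : ((List.replicate 9 c0 : List String), (List.replicate 9 c1 : List String),
        (List.replicate 9 c2 : List String), (List.replicate 9 c3 : List String)) =
        pvQuad [c0, c1, c2, c3] (List.range 36) := by rfl
    simp only [solution, hinit, pvFold_comm [c0, c1, c2, c3] moves.reverse (List.range 36) hv]
    rfl
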